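-- pv_equiv track=rewrite | github.com/nabepa/coding-test | this-is/implement/12-9.py | solution
-- ===== SOURCE A (Python) =====
-- def solution(s):
--     result = len(s)
--     for length in range(1, len(s) // 2 + 1):
--         compressed = ''
--         repeat_cnt = 1
--         start = 0
--         prev = s[start:length]
--
--         for start in range(length, len(s) + 1, length):
--             now = s[start:start + length]
--             if prev == now:
--                 repeat_cnt += 1
--             else:
--                 if repeat_cnt > 1:
--                     compressed += str(repeat_cnt)
--                 compressed += prev
--                 prev = now
--                 repeat_cnt = 1
--         compressed += s[start:]
--
--         result = min(result, len(compressed))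
--
--     return result
-- ===== SOURCE B (Python) =====
-- def solution(s):
--     n = len(s)
--     best = n
--     for L in range(1, n // 2 + 1):
--         m = n // L
--         streak = 0          # current count of consecutive j with s[j] == s[j + L]
--         run = 1
--         cost = n % L        # the trailing partial chunk is emitted as-is
--         for j in range(0, (m - 1) * L):
--             streak = streak + 1 if s[j] == s[j + L] else 0
--             if j % L == L - 1:
--                 # chunk j//L equals the next chunk iff the last L comparisons all matched
--                 if streak >= L:
--                     run += 1
--                 else:
--                     cost += L + (len(str(run)) if run > 1 else 0)
--                     run = 1
--         cost += L + (len(str(run)) if run > 1 else 0)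
--         best = min(best, cost)
--     return best
-- ===== Notes on version B (the rewrite author's own statement) =====
-- stated objective: alternative
-- what changed: B never builds chunk substrings or a compressed string: for each block length it makes a single forward character pass maintaining a streak counter of consecutive positions with s[j]==s[j+L], decides adjacent-chunk equality at each block boundary from the streak, and accumulates the compressed length arithmetically.
import Mathlib
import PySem

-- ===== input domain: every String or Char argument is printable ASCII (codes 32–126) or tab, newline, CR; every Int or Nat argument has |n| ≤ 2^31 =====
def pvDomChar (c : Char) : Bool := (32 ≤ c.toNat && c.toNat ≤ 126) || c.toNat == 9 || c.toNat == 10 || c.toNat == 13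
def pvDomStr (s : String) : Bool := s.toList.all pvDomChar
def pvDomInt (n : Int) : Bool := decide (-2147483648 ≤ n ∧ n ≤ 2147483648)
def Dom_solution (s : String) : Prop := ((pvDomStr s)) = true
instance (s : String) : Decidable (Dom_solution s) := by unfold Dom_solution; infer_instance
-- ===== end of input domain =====

-- B replaces A's per-block-size chunk slicing, chunk comparison and compressed-string building by
-- a single forward character pass per block length: a streak counter of consecutive j with
-- s[j] == s[j+L] decides each adjacent-chunk equality at the block boundary, and the compressed
-- length is accumulated arithmetically; alternative structure, same values.

-- ===== PORT A =====
-- one step of A's inner `for start in range(length, len(s)+1, length)` loop;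
-- state = (compressed, repeat_cnt, prev, start)
def stepA (cs : List Char) (length : Int)
    (st : List Char × Int × List Char × Int) (start : Int) :
    List Char × Int × List Char × Int :=
  match st with
  | (compressed, repeat_cnt, prev, _) =>
    let now := PySem.List.slice cs (some start) (some (start + length))
    if prev = now then
      (compressed, repeat_cnt + 1, prev, start)
    else
      ((if repeat_cnt > 1 then compressed ++ PySem.Int.toChars repeat_cnt else compressed) ++ prev,
       1, now, start)

def solution (s : String) : Int :=
  let cs := s.toList
  let n : Int := PySem.Str.len s
  (PySem.List.pyRange 1 (PySem.Int.floordiv n 2 + 1) 1).foldl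
    (fun result length =>
      let st := (PySem.List.pyRange length (n + 1) length).foldl (stepA cs length)
                  ([], 1, PySem.List.slice cs (some 0) (some length), 0)
      let compressed := st.1 ++ PySem.List.slice cs (some st.2.2.2) none
      min result (compressed.length : Int))
    n

-- ===== PORT B =====
-- one step of B's inner `for j in range(0, (m - 1) * L)` loop; state = (streak, run, cost);
-- s[j] and s[j + L] are in range for every j the loop visits, so `(pyGet? …).getD 'A'`
-- is exactly Python's s[j] here (the default is never used)
def stepB (cs : List Char) (L : Int) (st : Int × Int × Int) (j : Int) : Int × Int × Int :=
  match st with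
  | (streak, run, cost) =>
    let streak' := if (PySem.List.pyGet? cs j).getD 'A' = (PySem.List.pyGet? cs (j + L)).getD 'A'
                   then streak + 1 else 0
    if PySem.Int.mod j L = L - 1 then
      if streak' ≥ L then (streak', run + 1, cost)
      else (streak', 1, cost + L + (if run > 1 then ((PySem.Int.toChars run).length : Int) else 0))
    else (streak', run, cost)

def solution_alt (s : String) : Int :=
  let cs := s.toList
  let n : Int := PySem.Str.len s
  (PySem.List.pyRange 1 (PySem.Int.floordiv n 2 + 1) 1).foldl
    (fun best L =>
      let m := PySem.Int.floordiv n L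
      let st := (PySem.List.pyRange 0 ((m - 1) * L) 1).foldl (stepB cs L)
                  (0, 1, PySem.Int.mod n L)
      min best (st.2.2 + L + (if st.2.1 > 1 then ((PySem.Int.toChars st.2.1).length : Int) else 0)))
    n

-- ===== PRECONDITION & SPEC =====
def Spec_solution (s : String) (out : Int) : Prop := out = solution_alt s
instance (s : String) (out : Int) : Decidable (Spec_solution s out) := by unfold Spec_solution; infer_instance

-- ===== CLAIM (what is proved, stated in full; the proofs are below) =====
def Claim_equal_solution : Prop := ∀ (s : String), Dom_solution s → Spec_solution s (solution s)

-- ===== LEMMAS AND PROOFS =====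

-- run-length compressed length of a chunk list: each maximal run of equal adjacent chunks
-- costs the chunk length plus the digit count of the run length (if > 1); the common
-- reference point both ports are reduced to
def chunksCost : List (List Char) → Int
  | [] => 0
  | head :: rest =>
    let k := (rest.takeWhile (fun c => decide (c = head))).length
    let run : Int := (k : Int) + 1
    (head.length : Int) + (if run > 1 then ((PySem.Int.toChars run).length : Int) else 0)
      + chunksCost (rest.drop k)
  termination_by cs => cs.length
  decreasing_by simp

-- proof-side abstraction of A's inner loop on the list of `now` chunks (the stored start dropped)
def goA (comp : List Char) (cnt : Int) (prev : List Char) :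
    List (List Char) → List Char × Int × List Char
  | [] => (comp, cnt, prev)
  | now :: rest =>
    if prev = now then goA comp (cnt + 1) prev rest
    else goA ((if cnt > 1 then comp ++ PySem.Int.toChars cnt else comp) ++ prev) 1 now rest

-- cost of the not-yet-committed run (cnt copies of prev, extended by the leading equal chunks)
-- followed by the rest of the chunk list
def costFrom (cnt : Int) (prev : List Char) (cs : List (List Char)) : Int :=
  let k := (cs.takeWhile (fun c => decide (c = prev))).length
  (if cnt + (k : Int) > 1 then ((PySem.Int.toChars (cnt + (k : Int))).length : Int) else 0)
    + (prev.length : Int) + chunksCost (cs.drop k)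

lemma chunksCost_cons (h : List Char) (rest : List (List Char)) :
    chunksCost (h :: rest) = costFrom 1 h rest := by
  rw [chunksCost, costFrom]
  have : (1 : Int) + ((rest.takeWhile (fun c => decide (c = h))).length : Int)
      = ((rest.takeWhile (fun c => decide (c = h))).length : Int) + 1 := by ring
  simp only [this]
  ring

lemma chunksCost_nil : chunksCost [] = 0 := by rw [chunksCost]

lemma chunksCost_singleton (x : List Char) : chunksCost [x] = (x.length : Int) := by
  rw [chunksCost]
  simp [chunksCost_nil]

lemma goA_cost :
    ∀ (fulls : List (List Char)) (comp : List Char) (cnt : Int) (prev e : List Char) (L' : Nat),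
      (∀ f ∈ fulls, f.length = L') → prev.length = L' → e.length < L' →
      (((goA comp cnt prev (fulls ++ [e])).1 ++ e).length : Int)
        = (comp.length : Int) + costFrom cnt prev (fulls ++ if e = [] then [] else [e]) := by
  intro fulls
  induction fulls with
  | nil =>
    intro comp cnt prev e L' _ hprev he
    have hne : prev ≠ e := by intro h; rw [h] at hprev; omega
    have hen : ¬ (e = prev) := fun h => hne h.symm
    simp only [List.nil_append, goA, if_neg hne]
    by_cases he0 : e = []
    · subst he0
      simp only [costFrom]
      simp [chunksCost_nil]
      split_ifs <;> simp <;> ring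
    · rw [if_neg he0]
      simp only [costFrom]
      rw [List.takeWhile_cons_of_neg (by simpa using hen)]
      simp only [List.length_nil, List.drop_zero, Nat.cast_zero, add_zero,
        chunksCost_singleton]
      split_ifs <;> simp <;> ring
  | cons f fs ih =>
    intro comp cnt prev e L' hfull hprev he
    by_cases hpf : prev = f
    · -- absorbed into the run
      simp only [List.cons_append, goA, if_pos hpf]
      rw [ih comp (cnt + 1) prev e L' (fun g hg => hfull g (List.mem_cons_of_mem _ hg)) hprev he]
      congr 1
      simp only [costFrom, List.cons_append]
      rw [List.takeWhile_cons_of_pos (by simpa using hpf.symm)]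
      simp only [List.length_cons, List.drop_succ_cons]
      push_cast
      ring_nf
    · -- commit the run, start a new one at f
      have hfp : ¬ (f = prev) := fun h => hpf h.symm
      simp only [List.cons_append, goA, if_neg hpf]
      rw [ih _ 1 f e L' (fun g hg => hfull g (List.mem_cons_of_mem _ hg))
            (hfull f (List.mem_cons_self)) he]
      have hcf : costFrom cnt prev (f :: (fs ++ if e = [] then [] else [e]))
            = (if cnt > 1 then ((PySem.Int.toChars cnt).length : Int) else 0)
              + (prev.length : Int) + chunksCost (f :: (fs ++ if e = [] then [] else [e])) := by
        simp only [costFrom]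
        rw [List.takeWhile_cons_of_neg (by simpa using hfp)]
        simp
      rw [hcf, chunksCost_cons]
      split_ifs <;> simp <;> ring

lemma stepA_fourth (cs : List Char) (l : Int) (st : List Char × Int × List Char × Int) (x : Int) :
    (stepA cs l st x).2.2.2 = x := by
  obtain ⟨a, b, c, d⟩ := st
  simp only [stepA]
  split <;> rfl

lemma foldl_stepA_go (cs : List Char) (l : Int) :
    ∀ (starts : List Int) (comp : List Char) (cnt : Int) (prev : List Char) (p : Int),
      (starts.foldl (stepA cs l) (comp, cnt, prev, p)).1
        = (goA comp cnt prev
            (starts.map (fun i => PySem.List.slice cs (some i) (some (i + l))))).1 := by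
  intro starts
  induction starts with
  | nil => intro comp cnt prev p; rfl
  | cons x xs ih =>
    intro comp cnt prev p
    simp only [List.foldl_cons, List.map_cons, stepA, goA]
    by_cases h : prev = PySem.List.slice cs (some x) (some (x + l))
    · simp only [if_pos h]; exact ih _ _ _ _
    · simp only [if_neg h]; exact ih _ _ _ _

lemma ceil_div_eq (n' L m r : Nat) (hL : 1 ≤ L) (hm : m = n' / L) (hr : r = n' % L) :
    (n' + L - 1) / L = if r = 0 then m else m + 1 := by
  have hdm : L * m + r = n' := by rw [hm, hr]; exact Nat.div_add_mod n' L
  have hrL : r < L := by rw [hr]; exact Nat.mod_lt _ (by omega)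
  by_cases h0 : r = 0
  · rw [if_pos h0]
    have h1 : n' + L - 1 = L * m + (L - 1) := by omega
    rw [h1, Nat.mul_add_div (by omega)]
    have h2 : (L - 1) / L = 0 := Nat.div_eq_of_lt (by omega)
    omega
  · rw [if_neg h0]
    have h1 : n' + L - 1 = L * (m + 1) + (r - 1) := by
      have hx : L * (m + 1) = L * m + L := by ring
      omega
    rw [h1, Nat.mul_add_div (by omega)]
    have h2 : (r - 1) / L = 0 := Nat.div_eq_of_lt (by omega)
    omega

-- A's inner loop result, for block size L, equals chunksCost of the chunk list (partial tail included)
lemma inner_eq (cs : List Char) (L : Nat) (hL : 1 ≤ L) (h2 : 2 * L ≤ cs.length)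
    (X : List Char × Int × List Char × Int)
    (hXdef : X = (PySem.List.pyRange (L : Int) ((cs.length : Int) + 1) (L : Int)).foldl
        (stepA cs (L : Int)) ([], 1, PySem.List.slice cs (some 0) (some (L : Int)), 0)) :
    ((X.1 ++ PySem.List.slice cs (some X.2.2.2) none).length : Int)
      = chunksCost ((PySem.List.pyRange 0 (cs.length : Int) (L : Int)).map
          (fun i => PySem.List.slice cs (some i) (some (i + (L : Int))))) := by
  set n' := cs.length with hn'
  set m := n' / L with hm
  set r := n' % L with hr
  have hdm : L * m + r = n' := by rw [hm, hr]; exact Nat.div_add_mod n' L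
  have hrL : r < L := by rw [hr]; exact Nat.mod_lt _ (by omega)
  have hmn : m * L ≤ n' := by rw [hm]; exact Nat.div_mul_le_self n' L
  have hm2 : 2 ≤ m := by rw [hm]; exact (Nat.le_div_iff_mul_le (by omega)).2 (by omega)
  have hml : L * m = m * L := by ring
  have hnr : n' - m * L = r := by omega
  -- the chunk at block index j, and the tail piece
  set f : Nat → List Char := fun j => (cs.drop (j * L)).take L with hf
  set e : List Char := cs.drop (m * L) with he
  have helen : e.length = r := by rw [he, List.length_drop, ← hn']; omega
  -- the A-side list of start indices
  have hstarts : PySem.List.pyRange (L : Int) ((n' : Int) + 1) (L : Int)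
      = (List.range m).map (fun k => (((k + 1) * L : Nat) : Int)) := by
    rw [PySem.List.pyRange_of_pos _ _ (by exact_mod_cast hL)]
    have hc : ((n' : Int) + 1 - L + L - 1) = (n' : Int) := by ring
    rw [if_pos (by push_cast; omega), hc]
    have : ((n' : Int) / (L : Int)).toNat = m := by
      rw [← Int.natCast_div]; exact Int.toNat_natCast _
    rw [this]
    exact List.map_congr_left (fun k _ => by push_cast; ring)
  -- the B-side list of chunk start indices
  have hchunkidx : PySem.List.pyRange 0 (n' : Int) (L : Int)
      = (List.range (if r = 0 then m else m + 1)).map (fun k => ((k * L : Nat) : Int)) := by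
    rw [PySem.List.pyRange_of_pos _ _ (by exact_mod_cast hL)]
    have hm' : ((n' : Int) - 0 + L - 1) = ((n' + L - 1 : Nat) : Int) := by
      rw [Nat.cast_sub (by omega : 1 ≤ n' + L)]; push_cast; ring
    rw [if_pos (by push_cast; omega), hm']
    rw [← Int.natCast_div, Int.toNat_natCast, ceil_div_eq n' L m r hL hm hr]
    exact List.map_congr_left (fun k _ => by push_cast; ring)
  have hslice : ∀ k : Nat, PySem.List.slice cs (some ((k * L : Nat) : Int))
      (some (((k * L : Nat) : Int) + (L : Int))) = f k := by
    intro k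
    rw [PySem.List.slice_natCast_add]
  set fulls : List (List Char) := (List.range (m - 1)).map (fun k => f (k + 1)) with hfulls
  have hrange : List.range m = List.range (m - 1) ++ [m - 1] := by
    conv_lhs => rw [show m = (m - 1) + 1 by omega]
    exact List.range_succ
  have hfm : f m = e := by
    rw [hf, he]
    exact List.take_of_length_le (by simp; omega)
  have hprev0 : PySem.List.slice cs (some 0) (some (L : Int)) = f 0 := by
    rw [PySem.List.slice_zero_start, PySem.List.slice_to_natCast]
    simp [hf]
  -- last stored start
  have hlast : X.2.2.2 = ((m * L : Nat) : Int) := by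
    rw [hXdef, hstarts, hrange, List.map_append, List.foldl_append]
    simp only [List.map_cons, List.map_nil, List.foldl_cons, List.foldl_nil, stepA_fourth]
    congr 2
    omega
  -- the compressed part via the abstract loop
  have hnows : (List.range m).map ((fun i => PySem.List.slice cs (some i) (some (i + (L : Int))))
        ∘ (fun k => (((k + 1) * L : Nat) : Int)))
      = fulls ++ [e] := by
    rw [hrange, List.map_append]
    congr 1
    · rw [hfulls]
      exact List.map_congr_left (fun k _ => hslice (k + 1))
    · simp only [List.map_cons, List.map_nil, Function.comp]
      rw [show (m - 1 + 1) = m by omega, hslice m, hfm]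
  have hcomp : X.1 = (goA [] 1 (f 0) (fulls ++ [e])).1 := by
    rw [hXdef, hstarts, foldl_stepA_go, hprev0, List.map_map, hnows]
  rw [hcomp, hlast, PySem.List.slice_from_natCast, ← he]
  -- apply the cost lemma
  have hfull : ∀ g ∈ fulls, g.length = L := by
    intro g hg
    rw [hfulls] at hg
    simp only [List.mem_map, List.mem_range] at hg
    obtain ⟨k, hk, rfl⟩ := hg
    have hk2 : (k + 2) * L ≤ m * L := Nat.mul_le_mul_right L (by omega)
    have hk3 : (k + 2) * L = (k + 1) * L + L := by ring
    simp [hf]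
    omega
  have hprevlen : (f 0).length = L := by simp [hf]; omega
  have helt : e.length < L := by omega
  rw [goA_cost fulls [] 1 (f 0) e L hfull hprevlen helt]
  simp only [List.length_nil, Nat.cast_zero, zero_add]
  -- B side
  rw [hchunkidx, List.map_map]
  have hmapf : ((fun i => PySem.List.slice cs (some i) (some (i + (L : Int))))
        ∘ (fun k : Nat => ((k * L : Nat) : Int))) = f := by
    funext k
    exact hslice k
  rw [hmapf]
  have hsucc : List.map (f ∘ Nat.succ) (List.range (m - 1)) = fulls := by
    rw [hfulls]
    exact List.map_congr_left (fun k _ => rfl)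
  by_cases h0 : r = 0
  · have he0 : e = [] := List.eq_nil_of_length_eq_zero (by omega)
    rw [if_pos h0]
    rw [show (if e = [] then ([] : List (List Char)) else [e]) = [] from by simp [he0],
        List.append_nil]
    rw [show m = (m - 1) + 1 from by omega, List.range_succ_eq_map, List.map_cons, List.map_map,
        hsucc, chunksCost_cons]
  · have he0 : e ≠ [] := by
      intro h
      rw [h] at helen
      simp at helen
      omega
    rw [if_neg h0, if_neg he0, List.range_succ_eq_map, List.map_cons, List.map_map]
    have hrest : List.map (f ∘ Nat.succ) (List.range m) = fulls ++ [e] := by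
      rw [show m = (m - 1) + 1 from by omega, List.range_succ, List.map_append, hsucc]
      have hx : (f ∘ Nat.succ) (m - 1) = e := by
        simp only [Function.comp_apply, Nat.succ_eq_add_one]
        rw [show m - 1 + 1 = m from by omega, hfm]
      rw [List.map_cons, List.map_nil, hx]
    rw [hrest, chunksCost_cons]


-- ---------- B side ----------

-- proof-side abstraction of B's streak update over a list of indices (no boundary commits)
def streakF (cs : List Char) (L : Int) : Int → List Int → Int
  | s0, [] => s0
  | s0, j :: js =>
    streakF cs L (if (PySem.List.pyGet? cs j).getD 'A' = (PySem.List.pyGet? cs (j + L)).getD 'A'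
                  then s0 + 1 else 0) js

lemma streakF_append (cs : List Char) (L : Int) :
    ∀ (xs ys : List Int) (s0 : Int), streakF cs L s0 (xs ++ ys) = streakF cs L (streakF cs L s0 xs) ys := by
  intro xs
  induction xs with
  | nil => intro ys s0; rfl
  | cons j js ih => intro ys s0; simp only [List.cons_append, streakF]; exact ih _ _

lemma streakF_nonneg (cs : List Char) (L : Int) :
    ∀ (js : List Int) (s0 : Int), 0 ≤ s0 → 0 ≤ streakF cs L s0 js := by
  intro js
  induction js with
  | nil => intro s0 h; exact h
  | cons j js ih =>
    intro s0 h
    simp only [streakF]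
    split_ifs <;> [exact ih _ (by omega); exact ih 0 (by omega)]

lemma streakF_le (cs : List Char) (L : Int) :
    ∀ (js : List Int) (s0 : Int), 0 ≤ s0 → streakF cs L s0 js ≤ s0 + js.length := by
  intro js
  induction js with
  | nil => intro s0 h; simp [streakF]
  | cons j js ih =>
    intro s0 h
    simp only [streakF, List.length_cons]
    split_ifs
    · have := ih (s0 + 1) (by omega); push_cast; push_cast at this; omega
    · have := ih 0 (by omega); push_cast; push_cast at this; omega

lemma streakF_all (cs : List Char) (L : Int) :
    ∀ (js : List Int) (s0 : Int),
      (∀ j ∈ js, (PySem.List.pyGet? cs j).getD 'A' = (PySem.List.pyGet? cs (j + L)).getD 'A') →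
      streakF cs L s0 js = s0 + js.length := by
  intro js
  induction js with
  | nil => intro s0 _; simp [streakF]
  | cons j js ih =>
    intro s0 hall
    simp only [streakF, List.length_cons]
    rw [if_pos (hall j List.mem_cons_self), ih _ (fun x hx => hall x (List.mem_cons_of_mem _ hx))]
    push_cast; ring

lemma streakF_notall (cs : List Char) (L : Int) :
    ∀ (js : List Int) (s0 : Int), 0 ≤ s0 →
      (∃ j ∈ js, ¬ ((PySem.List.pyGet? cs j).getD 'A' = (PySem.List.pyGet? cs (j + L)).getD 'A')) →
      streakF cs L s0 js < js.length := by
  intro js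
  induction js with
  | nil => intro s0 _ h; simp at h
  | cons j js ih =>
    intro s0 hs h
    simp only [streakF, List.length_cons]
    obtain ⟨x, hx, hnx⟩ := h
    rcases List.mem_cons.1 hx with rfl | hx'
    · rw [if_neg hnx]
      have := streakF_le cs L js 0 (by omega)
      push_cast; omega
    · split_ifs
      · have := ih (s0 + 1) (by omega) ⟨x, hx', hnx⟩; push_cast; push_cast at this; omega
      · have := ih 0 (by omega) ⟨x, hx', hnx⟩; push_cast; push_cast at this; omega

-- stepB without a boundary hit only updates the streak
lemma foldl_stepB_noCommit (cs : List Char) (L : Int) :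
    ∀ (js : List Int) (s0 run cost : Int),
      (∀ j ∈ js, ¬ (PySem.Int.mod j L = L - 1)) →
      js.foldl (stepB cs L) (s0, run, cost) = (streakF cs L s0 js, run, cost) := by
  intro js
  induction js with
  | nil => intro s0 run cost _; rfl
  | cons j js ih =>
    intro s0 run cost hall
    simp only [List.foldl_cons, stepB, streakF]
    rw [if_neg (hall j List.mem_cons_self)]
    exact ih _ _ _ (fun x hx => hall x (List.mem_cons_of_mem _ hx))

-- character equality at all offsets of block b ↔ chunk b equals chunk b+1
lemma allE_iff_chunk_eq (cs : List Char) (L b : Nat) (hL : 1 ≤ L)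
    (hble : b * L + 2 * L ≤ cs.length) :
    ((∀ j ∈ PySem.List.pyRange ((b * L : Nat) : Int) ((b * L + L : Nat) : Int) 1,
        (PySem.List.pyGet? cs j).getD 'A' = (PySem.List.pyGet? cs (j + (L : Int))).getD 'A')
      ↔ (cs.drop (b * L)).take L = (cs.drop ((b + 1) * L)).take L) := by
  have hchunk : ((cs.drop (b * L)).take L = (cs.drop ((b + 1) * L)).take L)
      ↔ (∀ u : Nat, u < L → cs[b * L + u]? = cs[b * L + u + L]?) := by
    constructor
    · intro h u hu
      have h1 := congrArg (fun l => l[u]?) h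
      simp only [List.getElem?_take, List.getElem?_drop, if_pos hu] at h1
      rw [show (b + 1) * L + u = b * L + u + L from by ring] at h1
      exact h1
    · intro h
      apply List.ext_getElem?
      intro i
      simp only [List.getElem?_take, List.getElem?_drop]
      by_cases hi : i < L
      · rw [if_pos hi, if_pos hi, h i hi, show (b + 1) * L + i = b * L + i + L from by ring]
      · rw [if_neg hi, if_neg hi]
  rw [hchunk]
  constructor
  · intro hall u hu
    have hmem : ((b * L + u : Nat) : Int)
        ∈ PySem.List.pyRange ((b * L : Nat) : Int) ((b * L + L : Nat) : Int) 1 := by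
      rw [PySem.List.mem_pyRange_one]
      constructor <;> (push_cast; omega)
    have hj := hall _ hmem
    rw [PySem.List.pyGet?_natCast,
        show ((b * L + u : Nat) : Int) + (L : Int) = ((b * L + u + L : Nat) : Int) from by
          push_cast; ring,
        PySem.List.pyGet?_natCast] at hj
    have hi1 : b * L + u < cs.length := by omega
    have hi2 : b * L + u + L < cs.length := by omega
    rw [List.getElem?_eq_getElem hi1, List.getElem?_eq_getElem hi2] at hj
    simp only [Option.getD_some] at hj
    rw [List.getElem?_eq_getElem hi1, List.getElem?_eq_getElem hi2, hj]
  · intro h j hj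
    rw [PySem.List.mem_pyRange_one] at hj
    obtain ⟨jn, rfl⟩ : ∃ jn : Nat, j = (jn : Int) :=
      ⟨j.toNat, (Int.toNat_of_nonneg (le_trans (by positivity) hj.1)).symm⟩
    have hlo : b * L ≤ jn := by exact_mod_cast hj.1
    have hhi : jn < b * L + L := by exact_mod_cast hj.2
    obtain ⟨u, rfl⟩ : ∃ u, jn = b * L + u := ⟨jn - b * L, by omega⟩
    have hu := h u (by omega)
    rw [PySem.List.pyGet?_natCast,
        show ((b * L + u : Nat) : Int) + (L : Int) = ((b * L + u + L : Nat) : Int) from by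
          push_cast; ring,
        PySem.List.pyGet?_natCast, hu]

-- one full block of B's inner loop commits exactly once, according to chunk equality
lemma blockStep (cs : List Char) (L b : Nat) (hL : 1 ≤ L) (hble : b * L + 2 * L ≤ cs.length)
    (s0 run cost : Int) (hs : 0 ≤ s0) :
    ∃ s1, 0 ≤ s1 ∧
      (PySem.List.pyRange ((b * L : Nat) : Int) ((b * L + L : Nat) : Int) 1).foldl
          (stepB cs (L : Int)) (s0, run, cost)
        = (s1,
           if (cs.drop (b * L)).take L = (cs.drop ((b + 1) * L)).take L then run + 1 else 1,
           if (cs.drop (b * L)).take L = (cs.drop ((b + 1) * L)).take L then cost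
           else cost + (L : Int) + (if run > 1 then ((PySem.Int.toChars run).length : Int) else 0)) := by
  have hcast : ((b * L + L : Nat) : Int) = ((b * L + L - 1 : Nat) : Int) + 1 := by omega
  have hsplit : PySem.List.pyRange ((b * L : Nat) : Int) ((b * L + L : Nat) : Int) 1
      = PySem.List.pyRange ((b * L : Nat) : Int) ((b * L + L - 1 : Nat) : Int) 1
        ++ [((b * L + L - 1 : Nat) : Int)] := by
    rw [hcast, PySem.List.pyRange_one_succ_right (by exact_mod_cast Nat.le_sub_one_of_lt (by omega))]
  have hnc : ∀ j ∈ PySem.List.pyRange ((b * L : Nat) : Int) ((b * L + L - 1 : Nat) : Int) 1,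
      ¬ (PySem.Int.mod j (L : Int) = (L : Int) - 1) := by
    intro j hj
    rw [PySem.List.mem_pyRange_one] at hj
    obtain ⟨jn, rfl⟩ : ∃ jn : Nat, j = (jn : Int) :=
      ⟨j.toNat, (Int.toNat_of_nonneg (le_trans (by positivity) hj.1)).symm⟩
    have hlo : b * L ≤ jn := by exact_mod_cast hj.1
    have hhi : jn < b * L + L - 1 := by exact_mod_cast hj.2
    rw [PySem.Int.mod_natCast]
    obtain ⟨u, rfl⟩ : ∃ u, jn = b * L + u := ⟨jn - b * L, by omega⟩
    have hmod : (b * L + u) % L = u % L := by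
      rw [Nat.mul_comm b L]
      exact Nat.mul_add_mod L b u
    rw [hmod, Nat.mod_eq_of_lt (by omega : u < L)]
    intro hcon
    omega
  have hmodlast : PySem.Int.mod ((b * L + L - 1 : Nat) : Int) (L : Int) = (L : Int) - 1 := by
    rw [PySem.Int.mod_natCast]
    have hml : (b * L + L - 1) % L = L - 1 := by
      rw [show b * L + L - 1 = b * L + (L - 1) from by omega, Nat.mul_comm b L,
          Nat.mul_add_mod]
      exact Nat.mod_eq_of_lt (by omega)
    rw [hml]
    omega
  rw [hsplit, List.foldl_append, foldl_stepB_noCommit cs (L : Int) _ s0 run cost hnc]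
  simp only [List.foldl_cons, List.foldl_nil, stepB, if_pos hmodlast]
  set S1 := streakF cs (L : Int) s0
      (PySem.List.pyRange ((b * L : Nat) : Int) ((b * L + L - 1 : Nat) : Int) 1) with hS1
  set Sb := streakF cs (L : Int) s0
      (PySem.List.pyRange ((b * L : Nat) : Int) ((b * L + L : Nat) : Int) 1) with hSb
  have hSstep : (if (PySem.List.pyGet? cs ((b * L + L - 1 : Nat) : Int)).getD 'A'
        = (PySem.List.pyGet? cs (((b * L + L - 1 : Nat) : Int) + (L : Int))).getD 'A'
      then S1 + 1 else 0) = Sb := by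
    rw [hSb, hsplit, streakF_append]
    rfl
  have hSnn : 0 ≤ Sb := streakF_nonneg cs _ _ s0 hs
  have hblock_len :
      (PySem.List.pyRange ((b * L : Nat) : Int) ((b * L + L : Nat) : Int) 1).length = L := by
    rw [PySem.List.length_pyRange_one]
    omega
  have hiff : (Sb ≥ (L : Int)) ↔ (cs.drop (b * L)).take L = (cs.drop ((b + 1) * L)).take L := by
    rw [← allE_iff_chunk_eq cs L b hL hble]
    constructor
    · intro hge
      by_contra hnall
      push_neg at hnall
      have hlt := streakF_notall cs (L : Int) _ s0 hs
        (by obtain ⟨j, hj1, hj2⟩ := hnall; exact ⟨j, hj1, hj2⟩)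
      rw [← hSb, hblock_len] at hlt
      omega
    · intro hall
      have heq := streakF_all cs (L : Int) _ s0 hall
      rw [← hSb, hblock_len] at heq
      omega
  rw [hSstep]
  refine ⟨Sb, hSnn, ?_⟩
  by_cases hc : (cs.drop (b * L)).take L = (cs.drop ((b + 1) * L)).take L
  · rw [if_pos (show Sb ≥ (L : Int) from hiff.mpr hc), if_pos hc, if_pos hc]
  · rw [if_neg (fun hge => hc (hiff.mp hge)), if_neg hc, if_neg hc]

-- finishing commit after B's inner loop (proof-side abbreviation)
def finishB (L : Int) (st : Int × Int × Int) : Int :=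
  st.2.2 + L + (if st.2.1 > 1 then ((PySem.Int.toChars st.2.1).length : Int) else 0)

lemma costFrom_cons_eq (cnt : Int) (x : List Char) (rest : List (List Char)) :
    costFrom cnt x (x :: rest) = costFrom (cnt + 1) x rest := by
  simp only [costFrom]
  rw [List.takeWhile_cons_of_pos (by simp)]
  simp only [List.length_cons, List.drop_succ_cons]
  push_cast
  ring_nf

lemma costFrom_cons_ne (cnt : Int) (prev x : List Char) (rest : List (List Char)) (h : x ≠ prev) :
    costFrom cnt prev (x :: rest)
      = (if cnt > 1 then ((PySem.Int.toChars cnt).length : Int) else 0) + (prev.length : Int)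
        + chunksCost (x :: rest) := by
  simp only [costFrom]
  rw [List.takeWhile_cons_of_neg (by simpa using h)]
  simp

-- B's inner loop over blocks b .. b+t-1, finished by the final commit, is costFrom
lemma floop (cs : List Char) (L : Nat) (hL : 1 ≤ L) :
    ∀ (t b : Nat) (s0 run cost : Int), 0 ≤ s0 → (b + t + 1) * L ≤ cs.length →
      finishB (L : Int) ((PySem.List.pyRange ((b * L : Nat) : Int) (((b + t) * L : Nat) : Int) 1).foldl
          (stepB cs (L : Int)) (s0, run, cost))
        = cost + costFrom run ((cs.drop (b * L)).take L)
            ((List.range' (b + 1) t).map (fun j => (cs.drop (j * L)).take L)) := by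
  intro t
  induction t with
  | zero =>
    intro b s0 run cost hs hb
    have hplen : ((cs.drop (b * L)).take L).length = L := by
      simp only [List.length_take, List.length_drop]
      have h1 : (b + 0 + 1) * L = b * L + L := by ring
      omega
    simp only [PySem.List.pyRange_one_eq_nil (le_refl ((b * L : Nat) : Int)),
      List.foldl_nil, finishB, List.range', List.map_nil, costFrom, List.takeWhile_nil,
      List.length_nil, Nat.cast_zero, add_zero, List.drop_nil, chunksCost_nil, hplen]
    ring
  | succ t ih =>
    intro b s0 run cost hs hb
    have hmul1 : (b + 1) * L = b * L + L := by ring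
    have hmul2 : (b + (t + 1) + 1) * L = (b + t + 2) * L := by ring
    have hmul3 : (b + (t + 1)) * L = ((b + 1) + t) * L := by ring
    have hmul4 : (b + 2) * L ≤ (b + t + 2) * L := Nat.mul_le_mul_right L (by omega)
    have hmul5 : (b + 2) * L = b * L + 2 * L := by ring
    have hble : b * L + 2 * L ≤ cs.length := by omega
    have hbL1 : ((b * L + L : Nat) : Int) = (((b + 1) * L : Nat) : Int) := by push_cast; ring
    have h1 : ((b * L : Nat) : Int) ≤ ((b * L + L : Nat) : Int) := by exact_mod_cast Nat.le_add_right _ _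
    have h2 : ((b * L + L : Nat) : Int) ≤ (((b + (t + 1)) * L : Nat) : Int) := by
      have hx : (b + (t + 1)) * L = b * L + (t + 1) * L := by ring
      have hy : 1 * L ≤ (t + 1) * L := Nat.mul_le_mul_right L (by omega)
      have hz : 1 * L = L := by ring
      exact_mod_cast (by omega : b * L + L ≤ (b + (t + 1)) * L)
    rw [PySem.List.pyRange_one_append ((b * L : Nat) : Int) ((b * L + L : Nat) : Int)
          (((b + (t + 1)) * L : Nat) : Int) h1 h2, List.foldl_append]
    obtain ⟨s1, hs1, hblk⟩ := blockStep cs L b hL hble s0 run cost hs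
    rw [hblk, hbL1, show (((b + (t + 1)) * L : Nat) : Int) = ((((b + 1) + t) * L : Nat) : Int) from
          by rw [hmul3]]
    have hbound : ((b + 1) + t + 1) * L ≤ cs.length := by
      have : ((b + 1) + t + 1) * L = (b + (t + 1) + 1) * L := by ring
      omega
    have hplen : ((cs.drop (b * L)).take L).length = L := by
      simp only [List.length_take, List.length_drop]
      omega
    have hrng : List.range' (b + 1) (t + 1) = (b + 1) :: List.range' (b + 2) t := rfl
    by_cases hc : (cs.drop (b * L)).take L = (cs.drop ((b + 1) * L)).take L
    · simp only [if_pos hc]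
      rw [ih (b + 1) s1 (run + 1) cost hs1 hbound, hrng, List.map_cons]
      rw [← hc, costFrom_cons_eq]
    · simp only [if_neg hc]
      rw [ih (b + 1) s1 1
            (cost + (L : Int) + (if run > 1 then ((PySem.Int.toChars run).length : Int) else 0))
            hs1 hbound, hrng, List.map_cons]
      rw [costFrom_cons_ne run ((cs.drop (b * L)).take L) ((cs.drop ((b + 1) * L)).take L)
            _ (fun h => hc h.symm), ← chunksCost_cons, hplen]
      ring

lemma chunksCost_unfold (hd : List Char) (tl : List (List Char)) :
    chunksCost (hd :: tl)
      = (hd.length : Int)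
        + (if ((tl.takeWhile (fun c => decide (c = hd))).length : Int) + 1 > 1
           then ((PySem.Int.toChars
             (((tl.takeWhile (fun c => decide (c = hd))).length : Int) + 1)).length : Int)
           else 0)
        + chunksCost (tl.drop (tl.takeWhile (fun c => decide (c = hd))).length) := by
  rw [chunksCost]

lemma takeWhile_append_all {α : Type} (p : α → Bool) :
    ∀ (l ys : List α), (∀ x ∈ l, p x = true) → (l ++ ys).takeWhile p = l ++ ys.takeWhile p := by
  intro l
  induction l with
  | nil => intro ys _; rfl
  | cons a l ih =>
    intro ys hall
    rw [List.cons_append, List.takeWhile_cons_of_pos (hall a List.mem_cons_self),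
        ih ys (fun x hx => hall x (List.mem_cons_of_mem _ hx)), List.cons_append]

lemma takeWhile_append_stop {α : Type} (p : α → Bool) :
    ∀ (l ys : List α), (∃ x ∈ l, p x = false) → (l ++ ys).takeWhile p = l.takeWhile p := by
  intro l
  induction l with
  | nil => intro ys h; simp at h
  | cons a l ih =>
    intro ys h
    obtain ⟨x, hx, hxf⟩ := h
    rcases List.mem_cons.1 hx with rfl | hx'
    · rw [List.cons_append, List.takeWhile_cons_of_neg (by simp [hxf]),
          List.takeWhile_cons_of_neg (by simp [hxf])]
    · by_cases hpa : p a = true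
      · rw [List.cons_append, List.takeWhile_cons_of_pos hpa, List.takeWhile_cons_of_pos hpa,
            ih ys ⟨x, hx', hxf⟩]
      · rw [List.cons_append, List.takeWhile_cons_of_neg (by simpa using hpa),
            List.takeWhile_cons_of_neg (by simpa using hpa)]

lemma length_takeWhile_lt {α : Type} (p : α → Bool) :
    ∀ (l : List α), (∃ x ∈ l, p x = false) → (l.takeWhile p).length < l.length := by
  intro l
  induction l with
  | nil => intro h; simp at h
  | cons a l ih =>
    intro h
    obtain ⟨x, hx, hxf⟩ := h
    rcases List.mem_cons.1 hx with rfl | hx'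
    · rw [List.takeWhile_cons_of_neg (by simp [hxf])]
      simp
    · by_cases hpa : p a = true
      · rw [List.takeWhile_cons_of_pos hpa]
        simp only [List.length_cons]
        exact Nat.add_lt_add_right (ih ⟨x, hx', hxf⟩) 1
      · rw [List.takeWhile_cons_of_neg (by simpa using hpa)]
        simp

-- a strictly shorter tail chunk adds exactly its own length
lemma chunksCost_append_small :
    ∀ (N : Nat) (xs : List (List Char)) (e : List Char) (L' : Nat), xs.length ≤ N → xs ≠ [] →
      (∀ x ∈ xs, x.length = L') → e.length < L' →
      chunksCost (xs ++ [e]) = chunksCost xs + (e.length : Int) := by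
  intro N
  induction N with
  | zero =>
    intro xs e L' hlen hne _ _
    cases xs with
    | nil => exact absurd rfl hne
    | cons h rest => simp at hlen
  | succ N ih =>
    intro xs e L' hlen hne hmem helen
    cases xs with
    | nil => exact absurd rfl hne
    | cons h rest =>
      have hh : h.length = L' := hmem h List.mem_cons_self
      have hpe : (decide (e = h)) = false := by
        simp only [decide_eq_false_iff_not]
        intro he
        rw [he, hh] at helen
        exact lt_irrefl _ helen
      rw [List.cons_append, chunksCost_unfold, chunksCost_unfold h rest]
      by_cases hall : ∀ x ∈ rest, (fun c => decide (c = h)) x = true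
      · rw [takeWhile_append_all _ rest [e] hall,
            show (List.takeWhile (fun c => decide (c = h)) [e]) = [] from by
              simp [List.takeWhile, hpe],
            List.append_nil, List.takeWhile_eq_self_iff.mpr hall, List.drop_left,
            List.drop_length, chunksCost_singleton, chunksCost_nil]
        ring
      · push_neg at hall
        obtain ⟨x, hx, hxf⟩ := hall
        have hex : ∃ y ∈ rest, (fun c => decide (c = h)) y = false :=
          ⟨x, hx, by simpa using hxf⟩
        rw [takeWhile_append_stop _ rest [e] hex]
        have hk0 : (rest.takeWhile (fun c => decide (c = h))).length < rest.length :=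
          length_takeWhile_lt _ rest hex
        rw [List.drop_append_of_le_length (le_of_lt hk0)]
        have hdropne : rest.drop (rest.takeWhile (fun c => decide (c = h))).length ≠ [] := by
          intro hnil
          have := congrArg List.length hnil
          simp only [List.length_drop, List.length_nil] at this
          omega
        have hdroplen : (rest.drop (rest.takeWhile (fun c => decide (c = h))).length).length ≤ N := by
          simp only [List.length_drop]
          simp only [List.length_cons] at hlen
          omega
        rw [ih _ e L' hdroplen hdropne
              (fun y hy => hmem y (List.mem_cons_of_mem _ (List.mem_of_mem_drop hy))) helen]
        ring

-- B's inner loop result, for block size L, equals the same chunksCost as A's inner loop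
lemma inner_eq_B (cs : List Char) (L : Nat) (hL : 1 ≤ L) (h2 : 2 * L ≤ cs.length)
    (Y : Int × Int × Int)
    (hYdef : Y = (PySem.List.pyRange 0
        ((PySem.Int.floordiv (cs.length : Int) (L : Int) - 1) * (L : Int)) 1).foldl
        (stepB cs (L : Int)) (0, 1, PySem.Int.mod (cs.length : Int) (L : Int))) :
    Y.2.2 + (L : Int) + (if Y.2.1 > 1 then ((PySem.Int.toChars Y.2.1).length : Int) else 0)
      = chunksCost ((PySem.List.pyRange 0 (cs.length : Int) (L : Int)).map
          (fun i => PySem.List.slice cs (some i) (some (i + (L : Int))))) := by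
  set n' := cs.length with hn'
  set m := n' / L with hm
  set r := n' % L with hr
  have hdm : L * m + r = n' := by rw [hm, hr]; exact Nat.div_add_mod n' L
  have hrL : r < L := by rw [hr]; exact Nat.mod_lt _ (by omega)
  have hmn : m * L ≤ n' := by rw [hm]; exact Nat.div_mul_le_self n' L
  have hm2 : 2 ≤ m := by rw [hm]; exact (Nat.le_div_iff_mul_le (by omega)).2 (by omega)
  set f : Nat → List Char := fun j => (cs.drop (j * L)).take L with hf
  -- LHS via floop
  have hflo : PySem.Int.floordiv (n' : Int) (L : Int) = ((m : Nat) : Int) := by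
    rw [hm]; exact PySem.Int.floordiv_natCast n' L
  have hmod : PySem.Int.mod (n' : Int) (L : Int) = ((r : Nat) : Int) := by
    rw [hr]; exact PySem.Int.mod_natCast n' L
  have hrangeB : PySem.List.pyRange 0 ((PySem.Int.floordiv (n' : Int) (L : Int) - 1) * (L : Int)) 1
      = PySem.List.pyRange ((0 * L : Nat) : Int) (((0 + (m - 1)) * L : Nat) : Int) 1 := by
    rw [hflo]
    have hcast : ((m : Int) - 1) * (L : Int) = (((0 + (m - 1)) * L : Nat) : Int) := by
      push_cast [Nat.cast_sub (show 1 ≤ m by omega)]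
      ring
    rw [hcast]
    norm_num
  have hbound : (0 + (m - 1) + 1) * L ≤ cs.length := by
    have hx : (0 + (m - 1) + 1) * L = m * L := by
      have : 0 + (m - 1) + 1 = m := by omega
      rw [this]
    rw [hx, ← hn']
    exact hmn
  have hfin : ∀ st : Int × Int × Int,
      st.2.2 + (L : Int) + (if st.2.1 > 1 then ((PySem.Int.toChars st.2.1).length : Int) else 0)
        = finishB (L : Int) st := fun st => rfl
  rw [hYdef, hmod, hfin, hrangeB,
      floop cs L hL (m - 1) 0 0 1 ((r : Nat) : Int) (le_refl 0) hbound]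
  -- LHS is now  ↑r + costFrom 1 (f 0) ((range' 1 (m-1)).map f)
  -- RHS: reduce the chunk list to  (range (if r = 0 then m else m+1)).map f
  have hchunkidx : PySem.List.pyRange 0 (n' : Int) (L : Int)
      = (List.range (if r = 0 then m else m + 1)).map (fun k => ((k * L : Nat) : Int)) := by
    rw [PySem.List.pyRange_of_pos _ _ (by exact_mod_cast hL)]
    have hm' : ((n' : Int) - 0 + L - 1) = ((n' + L - 1 : Nat) : Int) := by
      rw [Nat.cast_sub (by omega : 1 ≤ n' + L)]; push_cast; ring
    rw [if_pos (by push_cast; omega), hm']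
    rw [← Int.natCast_div, Int.toNat_natCast, ceil_div_eq n' L m r hL hm hr]
    exact List.map_congr_left (fun k _ => by push_cast; ring)
  have hslice : ∀ k : Nat, PySem.List.slice cs (some ((k * L : Nat) : Int))
      (some (((k * L : Nat) : Int) + (L : Int))) = f k := by
    intro k
    rw [PySem.List.slice_natCast_add]
  have hmapf : ((fun i => PySem.List.slice cs (some i) (some (i + (L : Int))))
        ∘ (fun k : Nat => ((k * L : Nat) : Int))) = f := by
    funext k
    exact hslice k
  rw [hchunkidx, List.map_map, hmapf]
  have hcons : (List.range m).map f = f 0 :: (List.range' 1 (m - 1)).map f := by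
    rw [List.range_eq_range', show m = (m - 1) + 1 from by omega]
    rfl
  by_cases h0 : r = 0
  · rw [if_pos h0, hcons, chunksCost_cons, h0]
    simp [hf]
  · rw [if_neg h0, List.range_succ, List.map_append]
    have hfull : ∀ x ∈ (List.range m).map f, x.length = L := by
      intro x hx
      simp only [List.mem_map, List.mem_range] at hx
      obtain ⟨k, hk, rfl⟩ := hx
      have hk1 : (k + 1) * L ≤ m * L := Nat.mul_le_mul_right L (by omega)
      have hk2 : (k + 1) * L = k * L + L := by ring
      simp only [hf, List.length_take, List.length_drop]
      omega
    have hmlc : L * m = m * L := Nat.mul_comm L m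
    have hfm : f m = cs.drop (m * L) := by
      simp only [hf]
      exact List.take_of_length_le (by simp only [List.length_drop]; omega)
    have hfmlen : (f m).length = r := by
      rw [hfm, List.length_drop]
      omega
    have hne : (List.range m).map f ≠ [] := by
      simp only [ne_eq, List.map_eq_nil_iff, List.range_eq_nil]
      omega
    rw [show List.map f [m] = [f m] from rfl,
        chunksCost_append_small ((List.range m).map f).length ((List.range m).map f) (f m) L
          (le_refl _) hne hfull (by omega : (f m).length < L),
        hfmlen, hcons, chunksCost_cons]
    ring

-- ===== VERDICT (by name: the statement is the Claim_ definition above) =====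
theorem solution_spec : Claim_equal_solution := by
  intro s _
  simp only [Spec_solution, solution, solution_alt, PySem.Str.len_eq]
  apply PySem.List.foldl_congr_mem
  intro acc x hx
  rw [PySem.List.mem_pyRange_one] at hx
  rw [PySem.Int.floordiv_eq_ediv_of_pos (by omega : (0:Int) < 2)] at hx
  have hx0 : 1 ≤ x := hx.1
  have hxn : 2 * x ≤ (s.toList.length : Int) := by omega
  obtain ⟨L, rfl⟩ : ∃ L : Nat, x = (L : Int) := ⟨x.toNat, (Int.toNat_of_nonneg (by omega)).symm⟩
  have hL : 1 ≤ L := by exact_mod_cast hx0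
  have h2 : 2 * L ≤ s.toList.length := by exact_mod_cast hxn
  exact congrArg (min acc)
    ((inner_eq s.toList L hL h2 _ rfl).trans (inner_eq_B s.toList L hL h2 _ rfl).symm)
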